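-- pv_equiv track=rewrite | github.com/frandev1/codember | Codember-2024/Challenge04/challenge04.py | sumDigitsPrime
-- ===== SOURCE A (Python) =====
-- def isPrime(num: int):
--     for i in range(2, num):
--         if (num % i == 0):
--             return False;
--     return True
--
-- def sumDigitsPrime(num: int):
--     res = 0
--     while(num > 0):
--         digit = num % 10
--         num //= 10
--         res += digit
--     if (isPrime(res)): return True
--     else: return False
-- ===== SOURCE B (Python) =====
-- def sumDigitsPrime(num: int):
--     res = 0
--     while num > 0:
--         res += num % 10
--         num //= 10
--     if res < 2:
--         return True
--     i = 2
--     while i * i <= res: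
--         if res % i == 0:
--             return False
--         i += 1
--     return True
-- ===== Notes on version B (the rewrite author's own statement) =====
-- stated objective: alternative
-- what changed: The primality test scans trial divisors only up to the square root (i*i <= res) instead of scanning every integer below res, with an explicit res<2 guard preserving that 0 and 1 count as prime.
import Mathlib
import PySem

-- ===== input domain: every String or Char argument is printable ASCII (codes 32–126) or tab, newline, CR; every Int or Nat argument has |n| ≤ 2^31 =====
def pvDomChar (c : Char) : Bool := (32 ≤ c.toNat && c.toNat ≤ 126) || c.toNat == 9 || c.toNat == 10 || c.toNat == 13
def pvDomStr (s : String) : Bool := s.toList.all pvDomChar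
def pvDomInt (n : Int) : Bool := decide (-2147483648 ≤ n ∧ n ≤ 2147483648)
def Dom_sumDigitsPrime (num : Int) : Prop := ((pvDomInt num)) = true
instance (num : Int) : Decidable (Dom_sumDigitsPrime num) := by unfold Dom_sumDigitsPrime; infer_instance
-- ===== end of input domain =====

-- B replaces A's scan of every trial divisor below res with the standard square-root
-- trial division (alternative algorithm; equal cost at this problem's tiny digit sums).

-- ===== PORT A =====
-- 'for i in range(2, num): if num % i == 0: return False / return True'
def isPrimeLoopA (num : Int) : List Int → Bool
  | [] => true
  | i :: rest => if PySem.Int.mod num i == 0 then false else isPrimeLoopA num rest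

def isPrime (num : Int) : Bool := isPrimeLoopA num (PySem.List.pyRange 2 num 1)

-- 'while num > 0: digit = num % 10; num //= 10; res += digit'
def digitLoopA (num res : Int) : Int :=
  if num > 0 then
    digitLoopA (PySem.Int.floordiv num 10) (res + PySem.Int.mod num 10)
  else res
termination_by num.toNat
decreasing_by
  rw [PySem.Int.floordiv_eq_ediv_of_pos (by norm_num)]
  omega

def sumDigitsPrime (num : Int) : Bool :=
  if isPrime (digitLoopA num 0) then true else false

-- ===== PORT B =====
-- 'while i * i <= res: if res % i == 0: return False; i += 1 / return True'
def trialLoopB (res i : Int) : Bool :=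
  if i * i ≤ res then
    if PySem.Int.mod res i == 0 then false
    else trialLoopB res (i + 1)
  else true
termination_by (res + 1 - i).toNat
decreasing_by
  rename_i h _
  have hi : i ≤ res := by nlinarith
  omega

-- 'while num > 0: res += num % 10; num //= 10'
def digitLoopB (num res : Int) : Int :=
  if num > 0 then
    digitLoopB (PySem.Int.floordiv num 10) (res + PySem.Int.mod num 10)
  else res
termination_by num.toNat
decreasing_by
  rw [PySem.Int.floordiv_eq_ediv_of_pos (by norm_num)]
  omega

def sumDigitsPrime_alt (num : Int) : Bool :=
  let res := digitLoopB num 0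
  if res < 2 then true else trialLoopB res 2

-- ===== PRECONDITION & SPEC =====
def Spec_sumDigitsPrime (num : Int) (out : Bool) : Prop := out = sumDigitsPrime_alt num
instance (num : Int) (out : Bool) : Decidable (Spec_sumDigitsPrime num out) := by unfold Spec_sumDigitsPrime; infer_instance

-- ===== CLAIM (what is proved, stated in full; the proofs are below) =====
def Claim_equal_sumDigitsPrime : Prop := ∀ (num : Int), Dom_sumDigitsPrime num → Spec_sumDigitsPrime num (sumDigitsPrime num)

-- ===== LEMMAS AND PROOFS =====

theorem digitLoop_eq (num res : Int) : digitLoopA num res = digitLoopB num res := by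
  induction num, res using digitLoopA.induct with
  | case1 num res h ih => rw [digitLoopA, digitLoopB, if_pos h, if_pos h]; exact ih
  | case2 num res h => rw [digitLoopA, digitLoopB, if_neg h, if_neg h]

theorem digitLoop_nonneg (num res : Int) (h : 0 ≤ res) : 0 ≤ digitLoopA num res := by
  induction num, res using digitLoopA.induct with
  | case1 num res hp ih =>
      rw [digitLoopA, if_pos hp]
      refine ih ?_
      have hm := PySem.Int.mod_eq_emod_of_pos (a := num) (show (0:Int) < 10 by norm_num)
      have h2 : 0 ≤ num % (10 : Int) := Int.emod_nonneg num (by norm_num)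
      omega
  | case2 num res hp => rw [digitLoopA, if_neg hp]; exact h

theorem isPrimeLoopA_eq_true_iff (num : Int) (l : List Int) :
    isPrimeLoopA num l = true ↔ ∀ i ∈ l, ¬ (i ∣ num) := by
  induction l with
  | nil => simp [isPrimeLoopA]
  | cons i rest ih =>
      cases hm : (PySem.Int.mod num i == 0) with
      | true =>
          have hd : i ∣ num := (PySem.Int.mod_eq_zero_iff_dvd num i).mp (by simpa using hm)
          simp [isPrimeLoopA, hm, hd]
      | false =>
          have hnd : ¬ (i ∣ num) := fun hd => by
            simp [(PySem.Int.mod_eq_zero_iff_dvd num i).mpr hd] at hm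
          simp [isPrimeLoopA, hm, ih, hnd]

theorem trialLoopB_eq_true_iff (res : Int) : ∀ i : Int, 1 ≤ i →
    (trialLoopB res i = true ↔ ∀ j, i ≤ j → j * j ≤ res → ¬ (j ∣ res)) := by
  intro i
  induction i using trialLoopB.induct (res := res) with
  | case1 i h hm =>
      intro _
      rw [trialLoopB, if_pos h]
      have hd : i ∣ res := (PySem.Int.mod_eq_zero_iff_dvd res i).mp (by simpa using hm)
      simp only [hm, if_true]
      constructor
      · intro hf; exact absurd hf (by simp)
      · intro hall; exact absurd hd (hall i le_rfl h)
  | case2 i h hm ih =>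
      intro hi
      rw [trialLoopB, if_pos h]
      have hnd : ¬ (i ∣ res) := fun hd => by
        simp [(PySem.Int.mod_eq_zero_iff_dvd res i).mpr hd] at hm
      simp only [Bool.not_eq_true] at hm
      simp only [hm, Bool.false_eq_true, if_false]
      rw [ih (by omega)]
      constructor
      · intro hall j hij hjj
        rcases eq_or_lt_of_le hij with rfl | hlt
        · exact hnd
        · exact hall j (by omega) hjj
      · intro hall j hij hjj; exact hall j (by omega) hjj
  | case3 i h =>
      intro hi
      rw [trialLoopB, if_neg h]
      constructor
      · intro _ j hij hjj
        exfalso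
        have : i * i ≤ j * j := by nlinarith
        omega
      · intro _; rfl

theorem prime_tests_agree (res : Int) (hres : 0 ≤ res) :
    isPrime res = (if res < 2 then true else trialLoopB res 2) := by
  by_cases h2 : res < 2
  · rw [if_pos h2]
    unfold isPrime
    rw [PySem.List.pyRange_one_eq_nil (by omega)]
    rfl
  · rw [if_neg h2]
    rw [not_lt] at h2
    unfold isPrime
    rw [Bool.eq_iff_iff, isPrimeLoopA_eq_true_iff, trialLoopB_eq_true_iff res 2 (by norm_num)]
    constructor
    · intro hall j h2j hjj
      refine hall j ?_
      rw [PySem.List.mem_pyRange_one]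
      exact ⟨h2j, by nlinarith⟩
    · intro hall i hi
      rw [PySem.List.mem_pyRange_one] at hi
      obtain ⟨h2i, hilt⟩ := hi
      intro hd
      obtain ⟨e, he⟩ := hd
      have he2 : 2 ≤ e := by nlinarith
      by_cases hsq : i * i ≤ res
      · exact hall i h2i hsq ⟨e, he⟩
      · have hei : e < i := by nlinarith
        have hee : e * e ≤ res := by nlinarith
        exact hall e he2 hee ⟨i, by linarith [he, mul_comm i e]⟩

-- ===== VERDICT (by name: the statement is the Claim_ definition above) =====
theorem sumDigitsPrime_spec : Claim_equal_sumDigitsPrime := by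
  intro num _
  unfold Spec_sumDigitsPrime sumDigitsPrime sumDigitsPrime_alt
  rw [← digitLoop_eq]
  have hres := digitLoop_nonneg num 0 le_rfl
  rw [← prime_tests_agree _ hres]
  by_cases h : isPrime (digitLoopA num 0) <;> simp [h]
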